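-- pv_equiv track=rewrite | github.com/Ingenious-c0der/PWWeb | PWS/PWWS/utils.py | week_number_generator
-- ===== SOURCE A (Python) =====
-- def week_number_generator(seed:int,total_weeks:int)->list:
--     number_set= set()
--     h, m, a = seed,seed,seed
--     for i in range(seed,total_weeks):
--         if h<total_weeks:
--             number_set.add(h)
--         if a<total_weeks :
--             number_set.add(a)
--         if m<total_weeks:
--             number_set.add(m)
--         h += 30
--         a += 5
--         m += 15
--     number_list = list(number_set)
--     number_list.sort()
--     return number_list
-- ===== SOURCE B (Python) =====
-- def week_number_generator(seed: int, total_weeks: int) -> list: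
--     # The 30- and 15-step sequences are subsets of the 5-step sequence,
--     # and the loop bound admits every multiple-of-5 offset below total_weeks,
--     # so the sorted union is exactly range(seed, total_weeks, 5).
--     return list(range(seed, total_weeks, 5))
-- ===== Notes on version B (the rewrite author's own statement) =====
-- stated objective: faster
-- what changed: Replaces the set-building loop plus sort with a direct emission of range(seed, total_weeks, 5), which the union provably equals.
import Mathlib
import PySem

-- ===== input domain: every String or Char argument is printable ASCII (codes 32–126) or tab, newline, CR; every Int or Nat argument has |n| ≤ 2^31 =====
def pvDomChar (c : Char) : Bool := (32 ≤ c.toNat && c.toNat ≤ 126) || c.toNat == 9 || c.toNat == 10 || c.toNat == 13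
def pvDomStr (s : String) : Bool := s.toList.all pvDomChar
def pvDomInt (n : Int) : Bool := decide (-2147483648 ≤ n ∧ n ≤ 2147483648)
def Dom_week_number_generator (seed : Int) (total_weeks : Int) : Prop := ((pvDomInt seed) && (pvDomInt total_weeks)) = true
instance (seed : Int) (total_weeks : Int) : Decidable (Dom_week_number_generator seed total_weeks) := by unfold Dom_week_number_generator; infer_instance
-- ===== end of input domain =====

-- B replaces A's set-building loop plus sort by directly emitting range(seed, total_weeks, 5),
-- which the sorted union provably equals (objective: faster).

-- ===== PORT A =====
-- one iteration of A's loop body over the state (number_set, h, m, a)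
def pvStep (total_weeks : Int) (st : PySem.Set Int × Int × Int × Int) (_i : Int) :
    PySem.Set Int × Int × Int × Int :=
  match st with
  | (s, h, m, a) =>
    let s := if h < total_weeks then PySem.Set.add s h else s
    let s := if a < total_weeks then PySem.Set.add s a else s
    let s := if m < total_weeks then PySem.Set.add s m else s
    (s, h + 30, m + 15, a + 5)

def week_number_generator (seed : Int) (total_weeks : Int) : List Int :=
  let st := (PySem.List.pyRange seed total_weeks 1).foldl (pvStep total_weeks)
      (PySem.Set.empty, seed, seed, seed)
  PySem.List.sorted st.1 (fun x => x)

-- ===== PORT B =====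
def week_number_generator_alt (seed : Int) (total_weeks : Int) : List Int :=
  PySem.List.pyRange seed total_weeks 5

-- ===== PRECONDITION & SPEC =====
def Spec_week_number_generator (seed : Int) (total_weeks : Int) (out : List Int) : Prop := out = week_number_generator_alt seed total_weeks
instance (seed : Int) (total_weeks : Int) (out : List Int) : Decidable (Spec_week_number_generator seed total_weeks out) := by unfold Spec_week_number_generator; infer_instance

-- ===== CLAIM (what is proved, stated in full; the proofs are below) =====
def Claim_equal_week_number_generator : Prop := ∀ (seed : Int) (total_weeks : Int), Dom_week_number_generator seed total_weeks → Spec_week_number_generator seed total_weeks (week_number_generator seed total_weeks)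

-- ===== LEMMAS AND PROOFS =====

-- membership after one conditional triple add
lemma pv_mem_step_set (tw : Int) (s : PySem.Set Int) (h m a x y : Int) :
    x ∈ (pvStep tw (s, h, m, a) y).1 ↔
      x ∈ s ∨ (x < tw ∧ (x = h ∨ x = m ∨ x = a)) := by
  simp only [pvStep, PySem.Set.add_eq_ite]
  split_ifs <;> simp_all [List.mem_append] <;>
    first
      | (intro _ hh; rcases hh with rfl | rfl | rfl <;> first | assumption | omega)
      | (constructor <;> intro hh <;>
          rcases hh with hh | hh <;>
          (try rcases hh with ⟨hx, hh⟩) <;>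
          (try rcases hh with hh | hh | hh) <;>
          (try rcases hh with hh | hh) <;>
          (try simp_all) <;> (try tauto) <;> (try omega))

-- the loop's set: its members are exactly the admitted h/m/a values of the remaining iterations
lemma pv_loop_mem (tw : Int) (l : List Int) (S : PySem.Set Int) (h m a x : Int) :
    x ∈ (l.foldl (pvStep tw) (S, h, m, a)).1 ↔
      x ∈ S ∨ ∃ i : Nat, i < l.length ∧ x < tw ∧
        (x = h + 30 * (i : Int) ∨ x = m + 15 * (i : Int) ∨ x = a + 5 * (i : Int)) := by
  induction l generalizing S h m a with
  | nil => simp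
  | cons y l ih =>
    have hstep : pvStep tw (S, h, m, a) y =
        ((pvStep tw (S, h, m, a) y).1, h + 30, m + 15, a + 5) := by
      simp [pvStep]
    rw [List.foldl_cons, hstep, ih]
    rw [pv_mem_step_set]
    constructor
    · rintro ((hS | ⟨hlt, hx⟩) | ⟨i, hi, hlt, hx⟩)
      · exact Or.inl hS
      · exact Or.inr ⟨0, by simp, hlt, by push_cast; omega⟩
      · exact Or.inr ⟨i + 1, by simp; omega, hlt, by push_cast; omega⟩
    · rintro (hS | ⟨i, hi, hlt, hx⟩)
      · exact Or.inl (Or.inl hS)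
      · match i with
        | 0 => exact Or.inl (Or.inr ⟨hlt, by push_cast at hx; omega⟩)
        | Nat.succ j =>
          exact Or.inr ⟨j, by simp at hi; omega, hlt, by push_cast at hx ⊢; omega⟩

-- the loop's set stays duplicate-free
lemma pv_loop_nodup (tw : Int) (l : List Int) (S : PySem.Set Int) (h m a : Int)
    (hS : S.Nodup) : (l.foldl (pvStep tw) (S, h, m, a)).1.Nodup := by
  induction l generalizing S h m a with
  | nil => simpa
  | cons y l ih =>
    rw [List.foldl_cons]
    have hstep : pvStep tw (S, h, m, a) y =
        ((pvStep tw (S, h, m, a) y).1, h + 30, m + 15, a + 5) := by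
      simp [pvStep]
    rw [hstep]
    apply ih
    simp only [pvStep, PySem.Set.add_eq_ite]
    split_ifs <;> simp_all [List.nodup_append] <;> aesop

lemma pv_pyRange5_pairwise (a b : Int) :
    (PySem.List.pyRange a b 5).Pairwise (· < ·) := by
  rw [PySem.List.pyRange_of_pos a b (by norm_num)]
  refine List.Pairwise.map _ ?_ List.pairwise_lt_range
  intro p q hpq
  omega

theorem pv_main (seed total_weeks : Int) :
    week_number_generator seed total_weeks = week_number_generator_alt seed total_weeks := by
  unfold week_number_generator week_number_generator_alt
  apply PySem.List.sorted_eq_of_perm_of_pairwise_lt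
  · rw [List.perm_ext_iff_of_nodup ((pv_pyRange5_pairwise seed total_weeks).imp ne_of_lt)
        (pv_loop_nodup _ _ _ _ _ _ (by simp [PySem.Set.empty]))]
    intro x
    rw [PySem.List.mem_pyRange_iff_of_pos (by norm_num), pv_loop_mem,
      PySem.List.length_pyRange_one]
    constructor
    · rintro ⟨hle, hlt, k, hk⟩
      refine Or.inr ⟨k.toNat, by omega, hlt, Or.inr (Or.inr ?_)⟩
      omega
    · rintro (hS | ⟨i, hi, hlt, hx⟩)
      · simp [PySem.Set.empty] at hS
      · refine ⟨by omega, hlt, ?_⟩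
        rcases hx with hx | hx | hx
        · exact ⟨6 * (i : Int), by omega⟩
        · exact ⟨3 * (i : Int), by omega⟩
        · exact ⟨(i : Int), by omega⟩
  · exact pv_pyRange5_pairwise seed total_weeks

-- ===== VERDICT (by name: the statement is the Claim_ definition above) =====
theorem week_number_generator_spec : Claim_equal_week_number_generator := by
  intro seed total_weeks _
  unfold Spec_week_number_generator
  exact pv_main seed total_weeks
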